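-- pv_equiv track=rewrite | github.com/amol179/DSA_Notes_Dump | USACO/Code_Force/1000/B. New Theatre Square/B. New Theatre Square.py | minimum_paving_cost
-- ===== SOURCE A (Python) =====
-- def minimum_paving_cost(testcases):
--     results = []
--
--     for testcase in testcases:
--         n, m, x, y, grid = testcase
--         total_cost = 0
--
--         for row in grid:
--             i = 0
--             while i < m:
--                 if row[i] == ".":  # White tile to be paved
--                     if (
--                         i + 1 < m and row[i + 1] == "." and y < 2 * x
--                     ):  # Check for adjacent white tiles and if 1x2 tile is cheaper
--                         total_cost += y
--                         i += 2  # Skip the next tile as it's already paved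
--                     else:  # Use 1x1 tile
--                         total_cost += x
--                         i += 1
--                 else:
--                     i += 1
--
--         results.append(total_cost)
--
--     return results
-- ===== SOURCE B (Python) =====
-- def _run_cost(run, x, y, pair_cheaper):
--     # cost of paving one maximal run of `run` white tiles
--     return run // 2 * y + run % 2 * x if pair_cheaper else run * x
--
--
-- def _testcase_cost(testcase):
--     n, m, x, y, grid = testcase
--     pair_cheaper = y < 2 * x
--     total = 0
--     for row in grid:
--         run = 0
--         for ch in row[:max(m, 0)]:
--             if ch == ".":
--                 run += 1
--             else:
--                 total += _run_cost(run, x, y, pair_cheaper)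
--                 run = 0
--         total += _run_cost(run, x, y, pair_cheaper)
--     return total
--
--
-- def minimum_paving_cost(testcases):
--     return [_testcase_cost(tc) for tc in testcases]
-- ===== Notes on version B (the rewrite author's own statement) =====
-- stated objective: simpler
-- what changed: Replaces the index-skipping greedy while-loop over each row with a single pass that decomposes the row into maximal runs of '.' and adds a closed-form cost (run//2)*y + (run%2)*x (or run*x when y >= 2*x) per run; per-testcase totals come from a list comprehension.
import Mathlib
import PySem

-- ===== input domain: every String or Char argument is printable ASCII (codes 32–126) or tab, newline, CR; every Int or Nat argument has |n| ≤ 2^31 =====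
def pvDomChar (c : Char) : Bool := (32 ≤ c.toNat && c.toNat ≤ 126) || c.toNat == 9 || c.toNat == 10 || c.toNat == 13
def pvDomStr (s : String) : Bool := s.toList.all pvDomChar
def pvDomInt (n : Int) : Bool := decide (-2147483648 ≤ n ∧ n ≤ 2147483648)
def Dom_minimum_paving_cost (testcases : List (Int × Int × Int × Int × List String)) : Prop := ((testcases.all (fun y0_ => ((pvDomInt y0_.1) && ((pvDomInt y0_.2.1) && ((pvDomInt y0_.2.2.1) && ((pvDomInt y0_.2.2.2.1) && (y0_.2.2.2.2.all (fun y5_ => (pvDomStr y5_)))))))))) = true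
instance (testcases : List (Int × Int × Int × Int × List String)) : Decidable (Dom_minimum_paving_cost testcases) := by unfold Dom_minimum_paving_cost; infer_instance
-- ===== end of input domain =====

-- B replaces A's index-skipping greedy while-loop by a one-pass decomposition of each row
-- into maximal runs of '.' with a closed-form cost per run (objective: simpler).


-- ===== PORT A =====
-- the `while i < m` loop of A, carrying total_cost; `none` from pyGet? is Python's
-- IndexError (excluded by Pre_), where this port just returns the current total
def pvRowLoopA (x y m : Int) (row : String) (total i : Int) : Int :=
  if _h : i < m then
    match PySem.Str.pyGet? row i with
    | none => total
    | some c =>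
      if c = '.' then
        if i + 1 < m ∧ PySem.Str.pyGet? row (i + 1) = some '.' ∧ y < 2 * x then
          pvRowLoopA x y m row (total + y) (i + 2)
        else
          pvRowLoopA x y m row (total + x) (i + 1)
      else
        pvRowLoopA x y m row total (i + 1)
  else total
termination_by (m - i).toNat
decreasing_by all_goals omega

def minimum_paving_cost (testcases : List (Int × Int × Int × Int × List String)) : List Int :=
  testcases.foldl (fun results tc =>
    match tc with
    | (_n, m, x, y, grid) =>
      results ++ [grid.foldl (fun total row => pvRowLoopA x y m row total 0) 0]) []

-- ===== PORT B =====
-- _run_cost(run, x, y, pair_cheaper)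
def pvRunCostB (run x y : Int) (pairCheaper : Bool) : Int :=
  if pairCheaper then PySem.Int.floordiv run 2 * y + PySem.Int.mod run 2 * x else run * x

-- the inner `for ch in row[:max(m, 0)]` loop of _testcase_cost, state = (total, run)
def pvRowCostB (x y : Int) (pairCheaper : Bool) (total : Int) (cs : List Char) : Int :=
  let st := cs.foldl
    (fun (st : Int × Int) ch =>
      if ch = '.' then (st.1, st.2 + 1) else (st.1 + pvRunCostB st.2 x y pairCheaper, 0))
    (total, 0)
  st.1 + pvRunCostB st.2 x y pairCheaper

-- _testcase_cost(testcase)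
def pvTestcaseCostB (tc : Int × Int × Int × Int × List String) : Int :=
  match tc with
  | (_n, m, x, y, grid) =>
    let pairCheaper : Bool := decide (y < 2 * x)
    grid.foldl
      (fun total row =>
        pvRowCostB x y pairCheaper total (PySem.Str.slice row none (some (max m 0))).toList)
      0

def minimum_paving_cost_alt (testcases : List (Int × Int × Int × Int × List String)) : List Int :=
  testcases.map pvTestcaseCostB

-- ===== PRECONDITION & SPEC =====
-- Pre_ excludes exactly the inputs where A raises IndexError: a row shorter than the
-- stated width m (with m > 0); on those row[i] raises in A's while-loop.
def Pre_minimum_paving_cost (testcases : List (Int × Int × Int × Int × List String)) : Prop :=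
  ∀ tc ∈ testcases, ∀ row ∈ tc.2.2.2.2, tc.2.1 ≤ (row.toList.length : Int) ∨ tc.2.1 ≤ 0
instance (testcases : List (Int × Int × Int × Int × List String)) : Decidable (Pre_minimum_paving_cost testcases) := by unfold Pre_minimum_paving_cost; infer_instance

def pvWitness_minimum_paving_cost : (List (Int × Int × Int × Int × List String)) :=
  [(1, 2, 10, 1, ["..", "*."]), (1, 3, 2, 3, ["..*"])]

def Spec_minimum_paving_cost (testcases : List (Int × Int × Int × Int × List String)) (out : List Int) : Prop := out = minimum_paving_cost_alt testcases
instance (testcases : List (Int × Int × Int × Int × List String)) (out : List Int) : Decidable (Spec_minimum_paving_cost testcases out) := by unfold Spec_minimum_paving_cost; infer_instance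

-- ===== CLAIM (what is proved, stated in full; the proofs are below) =====
def Claim_equal_minimum_paving_cost : Prop := ∀ (testcases : List (Int × Int × Int × Int × List String)), Dom_minimum_paving_cost testcases → Pre_minimum_paving_cost testcases → Spec_minimum_paving_cost testcases (minimum_paving_cost testcases)

-- ===== LEMMAS AND PROOFS =====

-- common reference function: left-to-right greedy cost of one row segment
def pvGreedy (x y : Int) : List Char → Int
  | [] => 0
  | [c] => if c = '.' then x else 0
  | c :: c' :: rest =>
    if c = '.' then
      if c' = '.' ∧ y < 2 * x then y + pvGreedy x y rest else x + pvGreedy x y (c' :: rest)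
    else pvGreedy x y (c' :: rest)

-- run-decomposition reference: cost of cs given a pending run of r dots
def pvRuns (x y : Int) (pairCheaper : Bool) : List Char → Nat → Int
  | [], r => pvRunCostB (r : Int) x y pairCheaper
  | c :: cs, r =>
    if c = '.' then pvRuns x y pairCheaper cs (r + 1)
    else pvRunCostB (r : Int) x y pairCheaper + pvRuns x y pairCheaper cs 0

theorem pvRunCostB_natCast (r : Nat) (x y : Int) (b : Bool) :
    pvRunCostB (r : Int) x y b = if b then ((r / 2 : Nat) : Int) * y + ((r % 2 : Nat) : Int) * x else (r : Int) * x := by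
  simp [pvRunCostB]

theorem pvRunCostB_zero (x y : Int) (b : Bool) : pvRunCostB 0 x y b = 0 := by
  cases b <;> simp [pvRunCostB]

theorem pvRunCostB_one (x y : Int) (b : Bool) : pvRunCostB 1 x y b = x := by
  cases b <;> simp [pvRunCostB]

-- P: greedy cost of a pure run of dots is the closed form
theorem pvGreedy_replicate (x y : Int) (r : Nat) :
    pvGreedy x y (List.replicate r '.') = pvRunCostB (r : Int) x y (decide (y < 2 * x)) := by
  induction r using Nat.twoStepInduction with
  | zero => simpa [pvGreedy] using (pvRunCostB_zero x y (decide (y < 2 * x))).symm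
  | one => simpa [pvGreedy] using (pvRunCostB_one x y (decide (y < 2 * x))).symm
  | more r ih ih1 =>
    by_cases hp : y < 2 * x
    · have : pvGreedy x y (List.replicate (r + 2) '.') = y + pvGreedy x y (List.replicate r '.') := by
        simp [List.replicate_succ, pvGreedy, hp]
      rw [this, ih, pvRunCostB_natCast, pvRunCostB_natCast]
      simp only [hp, decide_true, if_true]
      have h2 : (r + 2) / 2 = r / 2 + 1 := by omega
      have h3 : (r + 2) % 2 = r % 2 := by omega
      rw [h2, h3]; push_cast; ring
    · have hstep : pvGreedy x y (List.replicate (r + 2) '.') =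
          x + pvGreedy x y (List.replicate (r + 1) '.') := by
        simp [List.replicate_succ, pvGreedy, hp]
      rw [hstep, ih1, pvRunCostB_natCast, pvRunCostB_natCast]
      simp only [decide_eq_false hp, Bool.false_eq_true, if_false]
      push_cast; ring

-- Q: greedy cost of a run of dots followed by an obstacle splits off the closed form
theorem pvGreedy_replicate_append (x y : Int) (c : Char) (hc : c ≠ '.') (cs : List Char) (r : Nat) :
    pvGreedy x y (List.replicate r '.' ++ c :: cs) =
      pvRunCostB (r : Int) x y (decide (y < 2 * x)) + pvGreedy x y (c :: cs) := by
  induction r using Nat.twoStepInduction with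
  | zero => simp [pvRunCostB_zero x y (decide (y < 2 * x))]
  | one =>
    have h1 : ¬ (c = '.' ∧ y < 2 * x) := fun h => hc h.1
    simp [pvGreedy, h1, pvRunCostB_one x y (decide (y < 2 * x))]
  | more r ih ih1 =>
    by_cases hp : y < 2 * x
    · have hstep : pvGreedy x y (List.replicate (r + 2) '.' ++ c :: cs) =
          y + pvGreedy x y (List.replicate r '.' ++ c :: cs) := by
        simp [List.replicate_succ, pvGreedy, hp]
      rw [hstep, ih, pvRunCostB_natCast, pvRunCostB_natCast]
      simp only [decide_eq_true hp, if_true]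
      have h2 : (r + 2) / 2 = r / 2 + 1 := by omega
      have h3 : (r + 2) % 2 = r % 2 := by omega
      rw [h2, h3]; push_cast; ring
    · have hstep : pvGreedy x y (List.replicate (r + 2) '.' ++ c :: cs) =
          x + pvGreedy x y (List.replicate (r + 1) '.' ++ c :: cs) := by
        simp [List.replicate_succ, pvGreedy, hp]
      rw [hstep, ih1, pvRunCostB_natCast, pvRunCostB_natCast]
      simp only [decide_eq_false hp, Bool.false_eq_true, if_false]
      push_cast; ring

-- greedy skips a leading obstacle
theorem pvGreedy_cons_ne (x y : Int) (c : Char) (hc : c ≠ '.') (cs : List Char) :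
    pvGreedy x y (c :: cs) = pvGreedy x y cs := by
  cases cs <;> simp [pvGreedy, hc]

-- B3: run decomposition computes the greedy cost
theorem pvRuns_eq_greedy (x y : Int) (cs : List Char) (r : Nat) :
    pvRuns x y (decide (y < 2 * x)) cs r = pvGreedy x y (List.replicate r '.' ++ cs) := by
  induction cs generalizing r with
  | nil => simp [pvRuns, pvGreedy_replicate]
  | cons c cs ih =>
    by_cases hc : c = '.'
    · subst hc
      rw [pvRuns, if_pos rfl, ih (r + 1)]
      congr 1
      rw [List.replicate_succ' ]
      simp
    · rw [pvRuns, if_neg hc, ih 0, pvGreedy_replicate_append x y c hc cs r]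
      simp [pvGreedy_cons_ne x y c hc]

-- B1: the foldl of port B computes pvRuns
theorem pvRowCostB_eq_runs (x y : Int) (b : Bool) (cs : List Char) :
    ∀ (total : Int) (r : Nat),
      (let st := cs.foldl
        (fun (st : Int × Int) ch =>
          if ch = '.' then (st.1, st.2 + 1) else (st.1 + pvRunCostB st.2 x y b, 0))
        (total, (r : Int));
       st.1 + pvRunCostB st.2 x y b) = total + pvRuns x y b cs r := by
  induction cs with
  | nil => intro total r; simp [pvRuns]
  | cons c cs ih =>
    intro total r
    by_cases hc : c = '.'
    · have hcast : ((r : Int) + 1) = ((r + 1 : Nat) : Int) := by push_cast; ring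
      simp only [List.foldl_cons, hc, hcast, pvRuns]
      exact ih total (r + 1)
    · simpa [hc, pvRuns, add_assoc] using ih (total + pvRunCostB (r : Int) x y b) 0

theorem pvRowCostB_eq_greedy (x y total : Int) (cs : List Char) :
    pvRowCostB x y (decide (y < 2 * x)) total cs = total + pvGreedy x y cs := by
  have h := pvRowCostB_eq_runs x y (decide (y < 2 * x)) cs total 0
  simpa [pvRowCostB, pvRuns_eq_greedy] using h

-- A1: A's while-loop computes the greedy cost of the first m characters
theorem pvRowLoopA_eq_greedy (x y m : Int) (row : String)
    (hm : m.toNat ≤ row.toList.length) :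
    ∀ (k : Nat) (i total : Int), 0 ≤ i → (m - i).toNat ≤ k →
      pvRowLoopA x y m row total i =
        total + pvGreedy x y ((row.toList.take m.toNat).drop i.toNat) := by
  intro k
  induction k with
  | zero =>
    intro i total hi hk
    rw [pvRowLoopA, dif_neg (by omega)]
    have hnil : (row.toList.take m.toNat).drop i.toNat = [] :=
      List.drop_eq_nil_of_le (by rw [List.length_take]; omega)
    rw [hnil]; simp [pvGreedy]
  | succ k ih =>
    intro i total hi hk
    by_cases him : i < m
    · have hiN : i.toNat < row.toList.length := by omega
      have htlen : i.toNat < (row.toList.take m.toNat).length := by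
        rw [List.length_take]; omega
      have hi' : ((i.toNat : Nat) : Int) = i := Int.toNat_of_nonneg hi
      have hget : PySem.Str.pyGet? row i = some row.toList[i.toNat] := by
        have h := PySem.Str.pyGet?_natCast row i.toNat
        rw [hi'] at h
        rw [h, List.getElem?_eq_getElem hiN]
      have hdrop : (row.toList.take m.toNat).drop i.toNat =
          row.toList[i.toNat] :: (row.toList.take m.toNat).drop (i.toNat + 1) := by
        rw [List.drop_eq_getElem_cons htlen, List.getElem_take]
      rw [pvRowLoopA, dif_pos him, hget, hdrop]
      by_cases hdot : row.toList[i.toNat] = '.'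
      · by_cases him1 : i + 1 < m
        · have hi1N : i.toNat + 1 < row.toList.length := by omega
          have ht1len : i.toNat + 1 < (row.toList.take m.toNat).length := by
            rw [List.length_take]; omega
          have hget1 : PySem.Str.pyGet? row (i + 1) = some row.toList[i.toNat + 1] := by
            have h := PySem.Str.pyGet?_natCast row (i.toNat + 1)
            rw [show ((i.toNat + 1 : Nat) : Int) = i + 1 by omega] at h
            rw [h, List.getElem?_eq_getElem hi1N]
          have hdrop1 : (row.toList.take m.toNat).drop (i.toNat + 1) =
              row.toList[i.toNat + 1] :: (row.toList.take m.toNat).drop (i.toNat + 2) := by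
            rw [List.drop_eq_getElem_cons ht1len, List.getElem_take]
          by_cases hpy : row.toList[i.toNat + 1] = '.' ∧ y < 2 * x
          · have hcond : i + 1 < m ∧ PySem.Str.pyGet? row (i + 1) = some '.' ∧ y < 2 * x :=
              ⟨him1, by rw [hget1, hpy.1], hpy.2⟩
            simp only [hdot, if_pos hcond]
            rw [ih (i + 2) (total + y) (by omega) (by omega),
              show (i + 2).toNat = i.toNat + 2 by omega, hdrop1]
            simp [pvGreedy, hpy.1, hpy.2]
            ring
          · have hcond : ¬ (i + 1 < m ∧ PySem.Str.pyGet? row (i + 1) = some '.' ∧ y < 2 * x) := by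
              rintro ⟨-, hg, hy⟩
              rw [hget1, Option.some_inj] at hg
              exact hpy ⟨hg, hy⟩
            simp only [hdot, if_neg hcond]
            rw [ih (i + 1) (total + x) (by omega) (by omega),
              show (i + 1).toNat = i.toNat + 1 by omega, hdrop1]
            simp [pvGreedy, hpy]
            ring
        · have hcond : ¬ (i + 1 < m ∧ PySem.Str.pyGet? row (i + 1) = some '.' ∧ y < 2 * x) := by
            rintro ⟨h1, -⟩; exact him1 h1
          simp only [hdot, if_neg hcond]
          rw [ih (i + 1) (total + x) (by omega) (by omega),
            show (i + 1).toNat = i.toNat + 1 by omega]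
          have hnil : (row.toList.take m.toNat).drop (i.toNat + 1) = [] :=
            List.drop_eq_nil_of_le (by rw [List.length_take]; omega)
          rw [hnil]
          simp [pvGreedy]
      · simp only [hdot, if_false]
        rw [ih (i + 1) total (by omega) (by omega),
          show (i + 1).toNat = i.toNat + 1 by omega,
          pvGreedy_cons_ne x y _ hdot]
    · rw [pvRowLoopA, dif_neg him]
      have hnil : (row.toList.take m.toNat).drop i.toNat = [] :=
        List.drop_eq_nil_of_le (by rw [List.length_take]; omega)
      rw [hnil]; simp [pvGreedy]

-- per-row equality under Pre_
theorem pvRow_eq (x y m : Int) (row : String) (total : Int)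
    (hpre : m ≤ (row.toList.length : Int) ∨ m ≤ 0) :
    pvRowLoopA x y m row total 0 =
      pvRowCostB x y (decide (y < 2 * x)) total (PySem.Str.slice row none (some (max m 0))).toList := by
  have hm : m.toNat ≤ row.toList.length := by omega
  have hslice : (PySem.Str.slice row none (some (max m 0))).toList = row.toList.take m.toNat := by
    have h0 : (0:Int) ≤ max m 0 := le_max_right _ _
    simp [PySem.Str.slice, PySem.List.slice_to _ h0]
    omega
  rw [hslice, pvRowCostB_eq_greedy,
    pvRowLoopA_eq_greedy x y m row hm (m - 0).toNat 0 total le_rfl le_rfl]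
  simp

-- ===== VERDICT (by name: the statement is the Claim_ definition above) =====
-- A's per-testcase cost (proof-only name for the body of A's outer fold)
def pvACost (tc : Int × Int × Int × Int × List String) : Int :=
  match tc with
  | (_n, m, x, y, grid) => grid.foldl (fun total row => pvRowLoopA x y m row total 0) 0

theorem minimum_paving_cost_spec : Claim_equal_minimum_paving_cost := by
  intro tcs _hdom hpre
  unfold Spec_minimum_paving_cost minimum_paving_cost minimum_paving_cost_alt
  have hfun : (fun (results : List Int) (tc : Int × Int × Int × Int × List String) =>
      match tc with
      | (_n, m, x, y, grid) =>
        results ++ [grid.foldl (fun total row => pvRowLoopA x y m row total 0) 0])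
      = (fun results tc => results ++ [pvACost tc]) :=
    funext fun results => funext fun tc => by obtain ⟨n, m, x, y, g⟩ := tc; rfl
  rw [hfun, PySem.List.foldl_append_singleton_eq_map pvACost, List.nil_append]
  apply List.map_congr_left
  intro tc htc
  obtain ⟨n, m, x, y, grid⟩ := tc
  show grid.foldl (fun total row => pvRowLoopA x y m row total 0) 0 = pvTestcaseCostB (n, m, x, y, grid)
  unfold pvTestcaseCostB
  apply PySem.List.foldl_congr_mem
  intro total row hrow
  exact pvRow_eq x y m row total (hpre (n, m, x, y, grid) htc row hrow)
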